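-- pv_equiv track=rewrite | github.com/rsbohn/waffle8 | tools/txt2tape.py | encode_sixbit_field
-- ===== SOURCE A (Python) =====
-- from typing import List
--
-- HEADER_FIELD_LENGTH = 6  # Label and data format header fields are six characters each
--
-- SIXBIT_MASK = 0x3F
--
-- class Txt2TapeError(Exception):
--     """Raised when inputs cannot be encoded into a magtape record."""
--
-- def char_to_sixbit(value: str) -> int:
--     """Convert a single character to its SIXBIT value."""
--     if value == " ":
--         return 0
--     if "A" <= value <= "Z":
--         return ord(value) - 64
--     if "0" <= value <= "9":
--         return ord(value) - ord("0") + 32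
--     lookup = {
--         "!": 42,
--         ",": 43,
--         "-": 44,
--         ".": 45,
--         "'": 46,
--         ":": 47,
--         ";": 48,
--         "?": 49,
--     }
--     if value in lookup:
--         return lookup[value]
--     raise Txt2TapeError(f"Unsupported SIXBIT character: {value!r}")
--
-- def normalize_field(text: str) -> str:
--     """Uppercase, truncate, and pad a header field to exactly six characters."""
--     return text.upper()[:HEADER_FIELD_LENGTH].ljust(HEADER_FIELD_LENGTH)
--
-- def encode_sixbit_field(text: str) -> List[int]:
--     """Encode up to six characters of text as three SIXBIT words."""
--     processed = normalize_field(text)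
--     codes = [char_to_sixbit(ch) for ch in processed]
--     # Pair characters into 12-bit words (two SIXBIT chars per word)
--     words: List[int] = []
--     for idx in range(0, HEADER_FIELD_LENGTH, 2):
--         high = codes[idx] & SIXBIT_MASK
--         low = codes[idx + 1] & SIXBIT_MASK
--         words.append((high << 6) | low)
--     return words
-- ===== SOURCE B (Python) =====
-- from typing import List
--
-- HEADER_FIELD_LENGTH = 6
-- SIXBIT_MASK = 0x3F
--
-- class Txt2TapeError(Exception):
--     """Raised when inputs cannot be encoded into a magtape record."""
--
-- # SIXBIT code table built once: code of a character is its index in this string.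
-- _SIXBIT_CHARS = " ABCDEFGHIJKLMNOPQRSTUVWXYZ" + 5 * "\0" + "0123456789" + "!,-.':;?"
-- _SIXBIT = {ch: i for i, ch in enumerate(_SIXBIT_CHARS) if ch != "\0"}
--
-- def encode_sixbit_field(text: str) -> List[int]:
--     """Encode up to six characters of text as three SIXBIT words."""
--     field = text.upper()[:HEADER_FIELD_LENGTH].ljust(HEADER_FIELD_LENGTH)
--     total = 0
--     for ch in field:
--         code = _SIXBIT.get(ch)
--         if code is None:
--             raise Txt2TapeError(f"Unsupported SIXBIT character: {ch!r}")
--         total = total * 64 + code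
--     return [total // 16777216 % 4096, total // 4096 % 4096, total % 4096]
-- ===== Notes on version B (the rewrite author's own statement) =====
-- stated objective: alternative
-- what changed: Instead of building a list of six SIXBIT codes and pairing them by index into three words, B packs the codes into one 36-bit accumulator in a single left-to-right fold (total = total*64 + code, codes looked up in a table dict built once) and extracts the three 12-bit words arithmetically at the end.
import Mathlib
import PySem

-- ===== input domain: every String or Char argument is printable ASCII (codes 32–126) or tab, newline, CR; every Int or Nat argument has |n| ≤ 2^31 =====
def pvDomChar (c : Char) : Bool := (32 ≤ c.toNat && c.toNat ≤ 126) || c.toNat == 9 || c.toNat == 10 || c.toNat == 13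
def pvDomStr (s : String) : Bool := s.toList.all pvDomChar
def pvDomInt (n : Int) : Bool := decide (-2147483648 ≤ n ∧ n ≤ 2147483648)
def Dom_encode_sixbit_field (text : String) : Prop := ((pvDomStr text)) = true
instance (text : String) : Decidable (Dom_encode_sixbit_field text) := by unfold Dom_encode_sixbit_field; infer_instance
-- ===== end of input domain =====

-- B replaces A's list-of-codes + index-pairing loop by one accumulator packing all six codes
-- into a single 36-bit integer, extracting the three words arithmetically (objective: alternative).

-- ===== PORT A =====
-- char_to_sixbit; none = Python raises Txt2TapeError
def charToSixbitA (value : Char) : Option Int :=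
  if value = ' ' then some 0
  else if 'A' ≤ value ∧ value ≤ 'Z' then some ((value.toNat : Int) - 64)
  else if '0' ≤ value ∧ value ≤ '9' then some ((value.toNat : Int) - 48 + 32)
  else
    (PySem.Dict.ofList [('!', (42 : Int)), (',', 43), ('-', 44), ('.', 45),
                        ('\'', 46), (':', 47), (';', 48), ('?', 49)]).get? value

-- normalize_field (module helper used by A, and reused verbatim by B's first line):
-- text.upper()[:6].ljust(6); ljust pads on the right with spaces (exact: the slice has length ≤ 6)
def normalize_field (text : String) : List Char :=
  let t := PySem.List.slice (PySem.Str.upper text).toList none (some 6)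
  t ++ List.replicate (6 - t.length) ' '

def encode_sixbit_field (text : String) : List Int :=
  let processed := normalize_field text
  match processed.mapM charToSixbitA with
  | none => []  -- Python raises Txt2TapeError; excluded by Pre_
  | some codes =>
    -- for idx in range(0, 6, 2): words.append(((codes[idx] & 63) << 6) | (codes[idx+1] & 63))
    -- codes has length 6, so idx and idx+1 are always in range and the .getD default is never used
    (PySem.List.pyRange 0 6 2).foldl (fun words idx =>
      let high := PySem.Int.band ((PySem.List.pyGet? codes idx).getD 0) 63
      let low := PySem.Int.band ((PySem.List.pyGet? codes (idx + 1)).getD 0) 63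
      words ++ [PySem.Int.bor (high <<< (6 : Nat)) low]) []

-- ===== PORT B =====
-- _SIXBIT_CHARS: the code of a character is its index in this string ('\x00' marks unused codes)
def sixbitChars : List Char :=
  (" ABCDEFGHIJKLMNOPQRSTUVWXYZ\x00\x00\x00\x00\x000123456789!,-.':;?").toList

-- _SIXBIT = {ch: i for i, ch in enumerate(_SIXBIT_CHARS) if ch != "\0"}
def sixbitDict : PySem.Dict Char Int :=
  (PySem.List.enumerate sixbitChars).foldl
    (fun d p => if p.2 = '\x00' then d else d.insert p.2 p.1) PySem.Dict.empty

def encode_sixbit_field_alt (text : String) : List Int :=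
  let field := normalize_field text
  match field.foldl (fun acc ch =>
      match acc, sixbitDict.get? ch with
      | some t, some code => some (t * 64 + code)
      | _, _ => none) (some (0 : Int)) with
  | none => []  -- Python raises Txt2TapeError; excluded by Pre_
  | some total =>
    [PySem.Int.mod (PySem.Int.floordiv total 16777216) 4096,
     PySem.Int.mod (PySem.Int.floordiv total 4096) 4096,
     PySem.Int.mod total 4096]

-- ===== PRECONDITION & SPEC =====
def supportedChars : List Char :=
  [' ', 'A', 'B', 'C', 'D', 'E', 'F', 'G', 'H', 'I', 'J', 'K', 'L', 'M', 'N', 'O', 'P', 'Q', 'R', 'S', 'T', 'U', 'V', 'W', 'X', 'Y', 'Z', '0', '1', '2', '3', '4', '5', '6', '7', '8', '9', '!', ',', '-', '.', '\'', ':', ';', '?']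

-- Pre_ excludes exactly the inputs on which Python A raises Txt2TapeError: an unsupported
-- SIXBIT character among the first six characters of the uppercased text.
def Pre_encode_sixbit_field (text : String) : Prop :=
  (((PySem.Chars.upper text.toList).take 6).all (fun c => supportedChars.contains c)) = true
instance (text : String) : Decidable (Pre_encode_sixbit_field text) := by
  unfold Pre_encode_sixbit_field; infer_instance

def pvWitness_encode_sixbit_field : String := "Ab 3!"

def Spec_encode_sixbit_field (text : String) (out : List Int) : Prop := out = encode_sixbit_field_alt text
instance (text : String) (out : List Int) : Decidable (Spec_encode_sixbit_field text out) := by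
  unfold Spec_encode_sixbit_field; infer_instance

-- ===== CLAIM (what is proved, stated in full; the proofs are below) =====
def Claim_equal_encode_sixbit_field : Prop := ∀ (text : String), Dom_encode_sixbit_field text → Pre_encode_sixbit_field text → Spec_encode_sixbit_field text (encode_sixbit_field text)

-- ===== LEMMAS AND PROOFS =====

-- the SIXBIT code of a supported character, as a Nat (proof-side helper)
def codeN (c : Char) : Nat := ((charToSixbitA c).getD 0).toNat

theorem code_spec : ∀ c ∈ supportedChars,
    charToSixbitA c = some ((codeN c : Nat) : Int) ∧
    sixbitDict.get? c = some ((codeN c : Nat) : Int) ∧ codeN c < 64 := by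
  intro c hc
  set_option maxRecDepth 8192 in fin_cases hc <;> decide

theorem exists_len6 {α : Type} (l : List α) (h : l.length = 6) :
    ∃ a b c d e f, l = [a, b, c, d, e, f] := by
  rcases l with _ | ⟨a, _ | ⟨b, _ | ⟨c, _ | ⟨d, _ | ⟨e, _ | ⟨f, _ | ⟨g, l⟩⟩⟩⟩⟩⟩⟩ <;>
    simp_all

theorem bit_key : ∀ m : Nat, m < 64 → ∀ l : Nat, l < 64 →
    PySem.Int.bor ((PySem.Int.band (m : Int) 63) <<< (6 : Nat)) (PySem.Int.band (l : Int) 63)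
      = (m : Int) * 64 + l := by decide

theorem norm_len (text : String) : (normalize_field text).length = 6 := by
  unfold normalize_field
  simp only [PySem.List.slice_to _ (by norm_num : (0 : Int) ≤ 6), (show ((6:Int)).toNat = 6 from rfl), List.length_append,
    List.length_replicate, List.length_take]
  omega

theorem norm_sup (text : String) (hpre : Pre_encode_sixbit_field text) :
    ∀ c ∈ normalize_field text, c ∈ supportedChars := by
  have hpre' : ∀ c ∈ (PySem.Chars.upper text.toList).take 6, c ∈ supportedChars := by
    intro c hc
    have := List.all_eq_true.mp hpre c hc
    simpa using this
  unfold normalize_field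
  intro c hc
  simp only [PySem.List.slice_to _ (by norm_num : (0 : Int) ≤ 6), (show ((6:Int)).toNat = 6 from rfl), List.mem_append,
    List.mem_replicate] at hc
  rcases hc with hc | ⟨-, rfl⟩
  · exact hpre' c (by simpa [PySem.Str.toList_upper] using hc)
  · decide

-- ===== VERDICT (by name: the statement is the Claim_ definition above) =====
theorem encode_sixbit_field_spec : Claim_equal_encode_sixbit_field := by
  intro text _ hpre
  unfold Spec_encode_sixbit_field
  obtain ⟨c0, c1, c2, c3, c4, c5, hf⟩ := exists_len6 _ (norm_len text)
  have hsup := norm_sup text hpre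
  rw [hf] at hsup
  have h0 := code_spec c0 (hsup c0 (by simp))
  have h1 := code_spec c1 (hsup c1 (by simp))
  have h2 := code_spec c2 (hsup c2 (by simp))
  have h3 := code_spec c3 (hsup c3 (by simp))
  have h4 := code_spec c4 (hsup c4 (by simp))
  have h5 := code_spec c5 (hsup c5 (by simp))
  obtain ⟨a0, b0, w0⟩ := h0
  obtain ⟨a1, b1, w1⟩ := h1
  obtain ⟨a2, b2, w2⟩ := h2
  obtain ⟨a3, b3, w3⟩ := h3
  obtain ⟨a4, b4, w4⟩ := h4
  obtain ⟨a5, b5, w5⟩ := h5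
  have hr : PySem.List.pyRange 0 6 2 = [0, 2, 4] := by decide
  unfold encode_sixbit_field encode_sixbit_field_alt
  rw [hf]
  simp only [List.mapM_cons, List.mapM_nil, a0, a1, a2, a3, a4, a5, Option.bind_eq_bind,
    Option.bind_some, Option.pure_def, hr, List.foldl_cons, List.foldl_nil,
    b0, b1, b2, b3, b4, b5]
  norm_num [PySem.List.pyGet?, PySem.List.pyIdx?, (show Int.toNat 2 = 2 from rfl),
    (show Int.toNat 3 = 3 from rfl), (show Int.toNat 4 = 4 from rfl), (show Int.toNat 5 = 5 from rfl)]
  rw [bit_key _ w0 _ w1, bit_key _ w2 _ w3, bit_key _ w4 _ w5]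
  refine ⟨by omega, by omega, by omega⟩
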